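-- pv_equiv track=rewrite | github.com/dawonseo/programmers_algorithm | 괄호_변환.py | solution
-- ===== SOURCE A (Python) =====
-- def is_correct(str):
--     tmp = 0
--     for i in str:
--         if i == "(":
--             tmp += 1
--         elif i == ")":
--             tmp -= 1
--         if tmp < 0:
--             return False
--     return True
--
-- def rev(str):
--     ans = ''
--     for i in str:
--         if i == '(': ans += ')'
--         elif i == ')': ans += '('
--     return ans
--
-- def solution(p):
--     # 1. 입력이 빈 문자열일 경우, 빈 문자열을 반환합니다.
--     if len(p) == 0:
--         return ''
--
--     # 2. 문자열 w를 두 "균형잡인 괄호 문자열" u, v로 분리합니다.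
--     #   단, u는 "균형잡힌 괄호 문자열"로 더 이상 분리할 수 없어야 하며,
--     #   v는 빈 문자열이 될 수 있습니다.
--     a = 2
--     while True:
--         if p[:a].count("(") == p[:a].count(")"):
--             u = p[:a]
--             v = p[a:]
--             break
--         else:
--             a += 2
--
--     # 3. 문자열 u가 "올바른 괄호 문자열"이라면 문자열 v에 대해 1단계부터 다시 수행합니다.
--     if is_correct(u):
--         # 3-1. 수행한 결과 문자열을 u에 이어 붙인 후 반환합니다.
--         return u + solution(v)
--     # 4. 문자열 u가 "올바른 괄호 문자열"이 아니라면 아래 과정을 수행합니다.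
--     else:
--         # 4-1. 빈 문자열에 첫 번째로 문자로 '('를 붙입니다.
--         # 4-2. 문자열 v에 대한 1단계부터 재귀적으로 수행한 결과 문자열을 이어 붙입니다.
--         # 4-3. ')'를 다시 붙입니다.
--         # 4-4. u의 첫 번째와 마지막 문자를 제거하고,
--         #   나머지 문자열의 괄호 방향을 뒤집어서 뒤에 붙입니다.
--         ans = '(' + solution(v) + ')' + rev(u[1:-1])
--         # 4-5. 생성된 문자열을 반환합니다.
--         return ans
-- ===== SOURCE B (Python) =====
-- def solution(p):
--     if len(p) == 0:
--         return ''
--     # single running-balance scan: find first even-length prefix with equal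
--     # paren counts, tracking whether the balance ever went negative (correctness)
--     bal = 0
--     ok = True
--     a = len(p)
--     for i, ch in enumerate(p):
--         if ch == '(':
--             bal += 1
--         elif ch == ')':
--             bal -= 1
--         if bal < 0:
--             ok = False
--         if bal == 0 and (i + 1) % 2 == 0:
--             a = i + 1
--             break
--     u, v = p[:a], p[a:]
--     if ok:
--         return u + solution(v)
--     return '(' + solution(v) + ')' + ''.join(
--         '(' if c == ')' else ')' for c in u[1:-1] if c in '()')
-- ===== Notes on version B (the rewrite author's own statement) =====
-- stated objective: alternative
-- what changed: Replaces A's repeated prefix-recount split search (two prefix counts per candidate index) plus a separate is_correct pass and the rev helper by ONE running-balance scan per recursion level that finds the first even balanced split and checks correctness simultaneously; the per-level split search drops from quadratic to linear, though string slicing keeps both implementations quadratic overall.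
import Mathlib
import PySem

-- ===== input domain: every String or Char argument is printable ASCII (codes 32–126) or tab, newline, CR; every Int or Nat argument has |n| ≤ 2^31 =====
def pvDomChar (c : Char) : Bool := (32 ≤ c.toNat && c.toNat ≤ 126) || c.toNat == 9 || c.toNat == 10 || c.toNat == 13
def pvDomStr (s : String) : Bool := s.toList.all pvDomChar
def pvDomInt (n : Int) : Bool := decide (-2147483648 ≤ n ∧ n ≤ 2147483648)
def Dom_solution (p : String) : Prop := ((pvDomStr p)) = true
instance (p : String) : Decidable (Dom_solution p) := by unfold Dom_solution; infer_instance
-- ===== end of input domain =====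

-- B replaces A's repeated prefix-recount split search (plus its separate correctness
-- pass and rev helper) by ONE running-balance scan per recursion level (alternative).

-- ===== PORT A =====
-- is_correct(str)
def isCorrectA : List Char → Int → Bool
  | [], _ => true
  | c :: t, tmp =>
    let tmp' := if c = '(' then tmp + 1 else if c = ')' then tmp - 1 else tmp
    if tmp' < 0 then false else isCorrectA t tmp'

-- rev(str)
def revA : List Char → List Char
  | [] => []
  | c :: t => if c = '(' then ')' :: revA t else if c = ')' then '(' :: revA t else revA t

-- the 'a = 2; while True: … a += 2' search of A; Python diverges when the condition
-- never holds, so the recursion is bounded by a fuel that is never exhausted on Pre_ inputs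
def findA (l : List Char) : Nat → Nat → Nat
  | a, 0 => a
  | a, Nat.succ fuel =>
    if (l.take a).count '(' = (l.take a).count ')' then a else findA l (a + 2) fuel

theorem findA_ge (l : List Char) : ∀ (fuel a : Nat), a ≤ findA l a fuel
  | 0, _ => Nat.le_refl _
  | Nat.succ fuel, a => by
    unfold findA
    split
    · exact Nat.le_refl _
    · exact Nat.le_trans (by omega) (findA_ge l fuel (a + 2))

def solAList (l : List Char) : List Char :=
  if _hl : l.length = 0 then []
  else
    let a := findA l 2 l.length
    let u := l.take a
    let v := l.drop a
    if isCorrectA u 0 then u ++ solAList v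
    else '(' :: (solAList v ++ ')' :: revA (u.drop 1).dropLast)
termination_by l.length
decreasing_by
  all_goals
    simp only [List.length_drop]
    have h2 : 2 ≤ findA l 2 l.length := findA_ge l l.length 2
    omega

def solution (p : String) : String := String.mk (solAList p.toList)

-- ===== PORT B =====
-- the for-loop of Source B: running balance, 'ok' (balance never negative) flag;
-- returns (some breakIndex, ok) on break, (none, ok) if the loop finishes
def scanB : List Char → Int → Bool → Nat → Option Nat × Bool
  | [], _, ok, _ => (none, ok)
  | c :: t, bal, ok, i =>
    let bal' := if c = '(' then bal + 1 else if c = ')' then bal - 1 else bal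
    let ok' := if bal' < 0 then false else ok
    if bal' = 0 ∧ (i + 1) % 2 = 0 then (some (i + 1), ok')
    else scanB t bal' ok' (i + 1)

theorem scanB_lt (t : List Char) : ∀ (bal : Int) (ok : Bool) (i a : Nat),
    (scanB t bal ok i).1 = some a → i < a := by
  induction t with
  | nil => intro bal ok i a h; simp [scanB] at h
  | cons c t ih =>
    intro bal ok i a h
    unfold scanB at h
    by_cases hc : ((if c = '(' then bal + 1 else if c = ')' then bal - 1 else bal) = 0
        ∧ (i + 1) % 2 = 0)
    · simp only [if_pos hc] at h
      simp at h; omega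
    · simp only [if_neg hc] at h
      have := ih _ _ _ _ h
      omega

def solBList (l : List Char) : List Char :=
  if _hl : l.length = 0 then []
  else
    let r := scanB l 0 true 0
    let a := r.1.getD l.length
    let u := l.take a
    let v := l.drop a
    if r.2 then u ++ solBList v
    else '(' :: (solBList v ++ ')' ::
      (((u.drop 1).dropLast.filter fun c => c = '(' || c = ')').map
        fun c => if c = ')' then '(' else ')'))
termination_by l.length
decreasing_by
  all_goals
    simp only [List.length_drop]
    rcases h : (scanB l 0 true 0).1 with _ | a
    · simp [h]; omega
    · have := scanB_lt l 0 true 0 a h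
      simp [h]; omega

def solution_alt (p : String) : String := String.mk (solBList p.toList)

-- ===== PRECONDITION & SPEC =====
-- Pre_ excludes exactly the inputs whose open-parenthesis and close-parenthesis counts
-- differ: on those A's while-loop (at some recursion level) never finds an even prefix
-- with equal counts and A loops forever, returning no value.
def Pre_solution (p : String) : Prop := p.toList.count '(' = p.toList.count ')'
instance (p : String) : Decidable (Pre_solution p) := by unfold Pre_solution; infer_instance

def pvWitness_solution : String := "()))(("

def Spec_solution (p : String) (out : String) : Prop := out = solution_alt p
instance (p : String) (out : String) : Decidable (Spec_solution p out) := by unfold Spec_solution; infer_instance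

-- ===== CLAIM (what is proved, stated in full; the proofs are below) =====
def Claim_equal_solution : Prop := ∀ (p : String), Dom_solution p → Pre_solution p → Spec_solution p (solution p)

-- ===== LEMMAS AND PROOFS =====

-- signed paren value and prefix balance, the common yardstick of both ports
def pval (c : Char) : Int := if c = '(' then 1 else if c = ')' then -1 else 0
def pdiff (l : List Char) : Int := (l.map pval).sum

theorem step_eq (c : Char) (tmp : Int) :
    (if c = '(' then tmp + 1 else if c = ')' then tmp - 1 else tmp) = tmp + pval c := by
  simp only [pval]; split_ifs <;> omega

theorem pdiff_append (x y : List Char) : pdiff (x ++ y) = pdiff x + pdiff y := by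
  simp [pdiff]

theorem pdiff_snoc (x : List Char) (c : Char) : pdiff (x ++ [c]) = pdiff x + pval c := by
  simp [pdiff]

theorem pdiff_count (l : List Char) :
    pdiff l = (l.count '(' : Int) - (l.count ')' : Int) := by
  induction l with
  | nil => simp [pdiff]
  | cons c t ih =>
    simp only [pdiff, List.map_cons, List.sum_cons, List.count_cons]
    by_cases h1 : c = '('
    · simp [pval, h1, pdiff] at *; omega
    · by_cases h2 : c = ')'
      · simp [pval, h1, h2, pdiff] at *; omega
      · have h1' : ('(' == c) = false := by simp [BEq.comm (a := '('), h1]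
        have h2' : (')' == c) = false := by simp [BEq.comm (a := ')'), h2]
        simp [pval, h1, h2, pdiff, h1', h2'] at *; omega

theorem count_eq_iff (l : List Char) :
    (l.count '(' = l.count ')') ↔ pdiff l = 0 := by
  rw [pdiff_count]; omega

theorem findA_succ (l : List Char) (a fuel : Nat) :
    findA l a (fuel + 1)
      = if (l.take a).count '(' = (l.take a).count ')' then a else findA l (a + 2) fuel := rfl

theorem isCorrectA_append (x y : List Char) : ∀ tmp : Int,
    isCorrectA (x ++ y) tmp = (isCorrectA x tmp && isCorrectA y (tmp + pdiff x)) := by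
  induction x with
  | nil => intro tmp; simp [isCorrectA, pdiff]
  | cons c t ih =>
    intro tmp
    simp only [List.cons_append, isCorrectA, step_eq]
    by_cases hneg : tmp + pval c < 0
    · simp [hneg]
    · simp only [if_neg hneg, ih]
      have h : tmp + pval c + pdiff t = tmp + pdiff (c :: t) := by
        simp [pdiff]; ring
      rw [h]

theorem isCorrectA_single (c : Char) (tmp : Int) :
    isCorrectA [c] tmp = !decide (tmp + pval c < 0) := by
  simp only [isCorrectA, step_eq]
  split_ifs with h <;> simp [h]

theorem isCorrectA_snoc (x : List Char) (c : Char) :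
    isCorrectA (x ++ [c]) 0 = (if pdiff (x ++ [c]) < 0 then false else isCorrectA x 0) := by
  rw [isCorrectA_append, isCorrectA_single]
  have hp : 0 + pdiff x + pval c = pdiff (x ++ [c]) := by
    rw [pdiff_snoc]; ring
  rw [hp]
  by_cases h : pdiff (x ++ [c]) < 0 <;> simp [h]

theorem revA_eq (x : List Char) :
    revA x = (x.filter fun c => c = '(' || c = ')').map fun c => if c = ')' then '(' else ')' := by
  induction x with
  | nil => rfl
  | cons c t ih =>
    by_cases h1 : c = '('
    · simp [revA, h1, List.filter, ih]
    · by_cases h2 : c = ')'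
      · simp [revA, h1, h2, List.filter, ih]
      · simp [revA, h1, h2, List.filter, ih]

-- take helpers
theorem take_app (l₁ l₂ : List Char) (i : Nat) :
    (l₁ ++ l₂).take (l₁.length + i) = l₁ ++ l₂.take i := by
  simp [List.take_append]

theorem take_app_le (l₁ l₂ : List Char) (n : Nat) (h : n ≤ l₁.length) :
    (l₁ ++ l₂).take n = l₁.take n := by
  simp [List.take_append, Nat.sub_eq_zero_of_le h]

-- The central correspondence between A's split search and B's single scan.
-- 'pre' is the already-consumed prefix, 't' the rest; pre has even length and no
-- nonempty even prefix of 'pre' is balanced.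
theorem corrMain : ∀ (n : Nat) (t pre : List Char) (fuel : Nat),
    t.length = n →
    pre.length % 2 = 0 →
    t.length ≤ 2 * fuel →
    pre ++ t ≠ [] →
    (∀ j, 0 < j → j ≤ pre.length → j % 2 = 0 → pdiff (pre.take j) ≠ 0) →
    (match scanB t (pdiff pre) (isCorrectA pre 0) pre.length with
     | (some a, okr) =>
         findA (pre ++ t) (pre.length + 2) fuel = a ∧
         okr = isCorrectA ((pre ++ t).take a) 0 ∧
         pdiff ((pre ++ t).take a) = 0 ∧
         2 ≤ a ∧ a ≤ (pre ++ t).length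
     | (none, okr) =>
         okr = isCorrectA (pre ++ t) 0 ∧
         (pdiff (pre ++ t) = 0 →
           findA (pre ++ t) (pre.length + 2) fuel = (pre ++ t).length + 1)) := by
  intro n
  induction n using Nat.strong_induction_on with
  | _ n ih =>
    intro t pre fuel ht hpre hfuel hne hmiss
    match t with
    | [] =>
      simp only [scanB, List.append_nil]
      refine ⟨by trivial, fun hz => ?_⟩
      exfalso
      have hpne : pre ≠ [] := by simpa using hne
      have hlen : 0 < pre.length := List.length_pos_iff.mpr hpne
      exact hmiss pre.length hlen (Nat.le_refl _) hpre (by simpa using hz)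
    | [c] =>
      have hfuel1 : 1 ≤ fuel := by
        simp only [List.length_cons, List.length_nil] at hfuel; omega
      obtain ⟨fuel', rfl⟩ : ∃ f, fuel = f + 1 := ⟨fuel - 1, by omega⟩
      simp only [scanB, step_eq]
      rw [if_neg (by rintro ⟨-, h⟩; omega :
        ¬ ((pdiff pre + pval c = 0) ∧ (pre.length + 1) % 2 = 0))]
      simp only [scanB]
      constructor
      · rw [← pdiff_snoc, ← isCorrectA_snoc]
      · intro hz
        rw [findA_succ]
        have htk : (pre ++ [c]).take (pre.length + 2) = pre ++ [c] := by
          apply List.take_of_length_le; simp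
        rw [htk, if_pos ((count_eq_iff _).mpr hz)]
        simp
    | c :: d :: t'' =>
      have hfuel1 : 1 ≤ fuel := by
        simp only [List.length_cons] at hfuel; omega
      obtain ⟨fuel', rfl⟩ : ∃ f, fuel = f + 1 := ⟨fuel - 1, by omega⟩
      -- one scan step over c (parity fails), one over d (parity holds)
      simp only [scanB, step_eq]
      rw [if_neg (by rintro ⟨-, h⟩; omega :
        ¬ ((pdiff pre + pval c = 0) ∧ (pre.length + 1) % 2 = 0))]
      have hok1 : (if pdiff pre + pval c < 0 then false else isCorrectA pre 0)
          = isCorrectA (pre ++ [c]) 0 := by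
        rw [isCorrectA_snoc, pdiff_snoc]
      have hbal2 : pdiff pre + pval c + pval d = pdiff (pre ++ [c, d]) := by
        have h2 : pre ++ [c, d] = (pre ++ [c]) ++ [d] := by simp
        rw [h2, pdiff_snoc, pdiff_snoc]
      have hok2 : (if pdiff (pre ++ [c, d]) < 0 then false else isCorrectA (pre ++ [c]) 0)
          = isCorrectA (pre ++ [c, d]) 0 := by
        have h2 : pre ++ [c, d] = (pre ++ [c]) ++ [d] := by simp
        rw [h2]
        conv_rhs => rw [isCorrectA_snoc]
      have htake2 : (pre ++ (c :: d :: t'')).take (pre.length + 2) = pre ++ [c, d] := by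
        have h := take_app pre (c :: d :: t'') 2
        simpa using h
      have hassoc : pre ++ (c :: d :: t'') = (pre ++ [c, d]) ++ t'' := by simp
      rw [hok1, hbal2, hok2]
      by_cases hb2 : pdiff (pre ++ [c, d]) = 0
      · rw [if_pos (⟨hb2, by omega⟩ :
          (pdiff (pre ++ [c, d]) = 0) ∧ (pre.length + 1 + 1) % 2 = 0)]
        refine ⟨?_, ?_, ?_, by omega, by simp only [List.length_append, List.length_cons]; omega⟩
        · rw [findA_succ, htake2, if_pos ((count_eq_iff _).mpr hb2)]
        · rw [htake2]
        · rw [htake2]; exact hb2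
      · rw [if_neg (by rintro ⟨h, -⟩; exact hb2 h :
          ¬ ((pdiff (pre ++ [c, d]) = 0) ∧ (pre.length + 1 + 1) % 2 = 0))]
        -- recurse via ih with pre' = pre ++ [c, d]
        have hlen' : (pre ++ [c, d]).length = pre.length + 2 := by simp
        have hmiss' : ∀ j, 0 < j → j ≤ (pre ++ [c, d]).length → j % 2 = 0 →
            pdiff ((pre ++ [c, d]).take j) ≠ 0 := by
          intro j hj0 hjle hjm
          rw [hlen'] at hjle
          by_cases hj : j ≤ pre.length
          · rw [take_app_le _ _ _ hj]; exact hmiss j hj0 hj hjm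
          · have hje : j = pre.length + 2 := by omega
            subst hje
            rw [List.take_of_length_le (by simp)]
            exact hb2
        have hnlt : t''.length < n := by
          simp only [List.length_cons] at ht; omega
        have hrec := ih t''.length hnlt t'' (pre ++ [c, d]) fuel'
          rfl (by rw [hlen']; omega)
          (by simp only [List.length_cons] at hfuel; omega)
          (by simp) hmiss'
        rw [← hassoc, hlen'] at hrec
        have hfind : findA (pre ++ (c :: d :: t'')) (pre.length + 2) (fuel' + 1)
            = findA (pre ++ (c :: d :: t'')) (pre.length + 2 + 2) fuel' := by
          rw [findA_succ, htake2, if_neg (fun hcnt => hb2 ((count_eq_iff _).mp hcnt))]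
        rcases hs : scanB t'' (pdiff (pre ++ [c, d])) (isCorrectA (pre ++ [c, d]) 0)
            (pre.length + 2) with ⟨o, okr⟩
        rw [hs] at hrec
        rcases o with _ | a
        · exact ⟨hrec.1, fun hz => by rw [hfind]; exact hrec.2 hz⟩
        · exact ⟨by rw [hfind]; exact hrec.1, hrec.2.1, hrec.2.2.1, hrec.2.2.2.1,
            hrec.2.2.2.2⟩

-- main equivalence on lists
theorem sol_eq : ∀ (n : Nat) (l : List Char), l.length ≤ n → pdiff l = 0 →
    solAList l = solBList l := by
  intro n
  induction n with
  | zero =>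
    intro l hl _
    have : l = [] := by cases l <;> simp_all
    subst this
    simp [solAList, solBList]
  | succ n ih =>
    intro l hl hz
    by_cases hnil : l.length = 0
    · unfold solAList solBList; rw [dif_pos hnil, dif_pos hnil]
    · have hcorr := corrMain l.length l [] l.length rfl (by simp) (by omega)
        (by simpa using (by intro h; exact hnil (by simp [h]) : l ≠ []))
        (by intro j hj0 hjle _; exfalso; simp at hjle; omega)
      simp only [List.nil_append, List.length_nil] at hcorr
      have h0 : pdiff ([] : List Char) = 0 := rfl
      have hT : isCorrectA ([] : List Char) 0 = true := rfl
      rw [h0, hT] at hcorr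
      rcases hs : scanB l 0 true 0 with ⟨o, okr⟩
      rw [hs] at hcorr
      rcases o with _ | a
      · -- no break: u = whole l on both sides, v = []
        obtain ⟨hok, hfind⟩ := hcorr
        have hfa : findA l 2 l.length = l.length + 1 := by
          have := hfind hz
          simpa using this
        unfold solAList solBList
        rw [dif_neg hnil, dif_neg hnil]
        simp only [hs, hfa]
        have htk : l.take (l.length + 1) = l := List.take_of_length_le (by omega)
        have hdr : l.drop (l.length + 1) = [] := List.drop_of_length_le (by omega)
        have htk0 : l.take l.length = l := List.take_of_length_le (by omega)
        have hdr0 : l.drop l.length = [] := List.drop_of_length_le (by omega)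
        simp only [htk, hdr, htk0, hdr0, Option.getD]
        rw [← hok]
        have hrec : solAList [] = solBList [] := by simp [solAList, solBList]
        cases okr <;> simp [hrec, revA_eq]
      · -- break at a
        obtain ⟨hfa, hok, hpd, ha2, hale⟩ := hcorr
        have hfa' : findA l 2 l.length = a := by simpa using hfa
        unfold solAList solBList
        rw [dif_neg hnil, dif_neg hnil]
        simp only [hs, hfa', Option.getD]
        have hvz : pdiff (l.drop a) = 0 := by
          have := pdiff_append (l.take a) (l.drop a)
          rw [List.take_append_drop] at this
          omega
        have hvlen : (l.drop a).length ≤ n := by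
          simp only [List.length_drop]; omega
        have hrec := ih (l.drop a) hvlen hvz
        rw [← hok]
        cases okr <;> simp [hrec, revA_eq]

-- ===== VERDICT (by name: the statement is the Claim_ definition above) =====
theorem solution_spec : Claim_equal_solution := by
  intro p _ hpre
  unfold Spec_solution solution solution_alt
  have hz : pdiff p.toList = 0 := (count_eq_iff _).mp hpre
  rw [sol_eq p.toList.length p.toList (Nat.le_refl _) hz]
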